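-- pv_equiv track=rewrite | github.com/DmitriySolenkov/Python_HW5 | Ex1.py | amountCheck
-- ===== SOURCE A (Python) =====
-- def amountCheck(amount):
--     i = 0
-- # Цифра 8 - предельное количество по 28 конфет для цикла игры с общим запасом в 221 конфету
-- # Записана она сюда, чтобы не гонять цикл лишние разы
-- # Для игры с 2021 конфетой ограничение нужно поднять до 72
--
--     while i < 8:
--         if amount == i*28+1:
--             return True
--         else:
--             i += 1
--     if i == 8:
--         return False
-- ===== SOURCE B (Python) =====
-- def amountCheck(amount):
--     # closed-form arithmetic test: valid amounts are exactly 28*i+1 for i in 0..7,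
--     # i.e. the integers in [1, 197] congruent to 1 modulo 28
--     return 1 <= amount <= 197 and amount % 28 == 1
-- ===== Notes on version B (the rewrite author's own statement) =====
-- stated objective: simpler
-- what changed: Replaced the bounded while-loop that enumerates the eight candidates with a closed-form arithmetic test: amount is valid iff 1 <= amount <= 197 and amount % 28 == 1 (no loop, no index, no table).
import Mathlib
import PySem

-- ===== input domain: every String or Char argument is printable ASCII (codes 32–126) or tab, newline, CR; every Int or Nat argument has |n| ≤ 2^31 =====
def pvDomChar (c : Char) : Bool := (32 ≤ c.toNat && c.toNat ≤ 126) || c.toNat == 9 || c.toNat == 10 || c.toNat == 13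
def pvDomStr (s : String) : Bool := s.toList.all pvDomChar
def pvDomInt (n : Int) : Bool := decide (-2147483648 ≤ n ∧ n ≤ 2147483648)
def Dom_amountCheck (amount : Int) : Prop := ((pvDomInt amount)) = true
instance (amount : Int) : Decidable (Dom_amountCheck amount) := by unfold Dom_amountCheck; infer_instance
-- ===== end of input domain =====

-- B replaces A's bounded while-loop with the closed-form arithmetic test 1 <= amount <= 197 and amount % 28 == 1 (objective: simpler).


-- ===== PORT A =====
-- literal port of A: while i < 8: if amount == i*28+1 return True else i += 1; then return False
def amountCheckGo (amount : Int) (i : Nat) : Bool :=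
  if i < 8 then
    if amount = (i : Int) * 28 + 1 then true
    else amountCheckGo amount (i + 1)
  else false
termination_by 8 - i
def amountCheck (amount : Int) : Bool := amountCheckGo amount 0

-- ===== PORT B =====
-- B: closed-form arithmetic test — 1 <= amount <= 197 and amount % 28 == 1
def amountCheck_alt (amount : Int) : Bool :=
  decide (1 ≤ amount ∧ amount ≤ 197) && decide (PySem.Int.mod amount 28 = 1)

-- ===== PRECONDITION & SPEC =====
def Spec_amountCheck (amount : Int) (out : Bool) : Prop := out = amountCheck_alt amount
instance (amount : Int) (out : Bool) : Decidable (Spec_amountCheck amount out) := by unfold Spec_amountCheck; infer_instance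

-- ===== CLAIM (what is proved, stated in full; the proofs are below) =====
def Claim_equal_amountCheck : Prop := ∀ (amount : Int), Dom_amountCheck amount → Spec_amountCheck amount (amountCheck amount)

-- ===== LEMMAS AND PROOFS =====

-- ===== VERDICT (by name: the statement is the Claim_ definition above) =====
theorem amountCheck_spec : Claim_equal_amountCheck := by
  intro amount _
  unfold Spec_amountCheck
  show amountCheckGo amount 0 = amountCheck_alt amount
  rw [amountCheckGo, amountCheckGo, amountCheckGo, amountCheckGo, amountCheckGo,
      amountCheckGo, amountCheckGo, amountCheckGo, amountCheckGo]
  have hm : PySem.Int.mod amount 28 = amount % 28 := PySem.Int.mod_eq_emod_of_pos (by norm_num)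
  simp only [amountCheck_alt, hm]
  norm_num
  rw [Bool.eq_iff_iff]
  simp only [Bool.or_eq_true, Bool.and_eq_true, decide_eq_true_eq]
  omega
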